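-- pv_equiv track=rewrite | github.com/alisazhou/algo1 | problem_set4/ps4.py | scc_loop
-- ===== SOURCE A (Python) =====
-- def scc_dfs(graph, start, visited, currLabel, minions):
--     visited[start] = 0
--     heads = graph.get(start)
--     if heads:
--         for head in heads:
--             if head not in visited:
--                 minions.append(head)
--                 visited, currLabel, minions = scc_dfs(graph, head, visited, currLabel, minions)
--     visited[start] = currLabel
--     currLabel += 1
--     return visited, currLabel, minions
--
-- def scc_loop(graph, qtyNodes):
--     visited = {}
--     label = 1
--     leadersList = {}
--     for i in range(qtyNodes, 0, -1):
--         if i in graph and i not in visited: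
--             minions = []
--             visited, label, minions = scc_dfs(graph, i, visited, label, minions)
--             leadersList[i] = minions
--     return visited, leadersList
-- ===== SOURCE B (Python) =====
-- def scc_loop(graph, qtyNodes):
--     visited = {}
--     label = 1
--     leadersList = {}
--     for i in range(qtyNodes, 0, -1):
--         if i in graph and i not in visited:
--             minions = []
--             visited[i] = 0
--             stack = [(i, graph.get(i) or [])]
--             while stack:
--                 node, heads = stack.pop()
--                 if heads:
--                     h, rest = heads[0], heads[1:]
--                     stack.append((node, rest))
--                     if h not in visited:
--                         minions.append(h)
--                         visited[h] = 0
--                         stack.append((h, graph.get(h) or []))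
--                 else:
--                     visited[node] = label
--                     label += 1
--             leadersList[i] = minions
--     return visited, leadersList
-- ===== Notes on version B (the rewrite author's own statement) =====
-- stated objective: alternative
-- what changed: the recursive scc_dfs (state threaded through recursive calls) is replaced by an iterative traversal using an explicit stack of (node, remaining-heads) frames, which also avoids Python's recursion limit; the same DFS order, labels and minions lists are produced
import Mathlib
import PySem

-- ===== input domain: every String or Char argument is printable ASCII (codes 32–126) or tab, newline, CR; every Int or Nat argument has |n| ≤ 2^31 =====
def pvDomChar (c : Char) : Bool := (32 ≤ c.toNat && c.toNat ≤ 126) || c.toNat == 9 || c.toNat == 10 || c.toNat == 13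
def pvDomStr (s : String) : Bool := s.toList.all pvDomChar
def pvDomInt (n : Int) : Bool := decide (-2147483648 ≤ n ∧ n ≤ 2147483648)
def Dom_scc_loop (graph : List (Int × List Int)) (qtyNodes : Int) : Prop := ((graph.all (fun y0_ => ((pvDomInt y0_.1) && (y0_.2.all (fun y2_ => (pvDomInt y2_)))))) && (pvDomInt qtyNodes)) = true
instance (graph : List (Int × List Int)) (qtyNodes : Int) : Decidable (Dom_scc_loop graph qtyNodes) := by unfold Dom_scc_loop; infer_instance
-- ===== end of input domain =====

-- B replaces the recursive scc_dfs by an iterative traversal with an explicit stack of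
-- (node, remaining-heads) frames (same DFS order, same labels); no speed claim.
-- The Nat fuel arguments in both ports are Lean termination bookkeeping only; they are
-- large enough never to run out (fuel bounds recursion/stack DEPTH, which is at most the
-- number of distinct nodes mentioned by the graph).

-- heads of a node: graph.get(start), with None / missing treated as the empty list
-- (exact: Python's 'if heads:' skips the loop for both None and [])
def pvHeads (g : PySem.Dict Int (List Int)) (u : Int) : List Int := (g.get? u).getD []

-- fuel used by both ports: an upper bound on the number of distinct nodes in the graph
def pvFuel (graph : List (Int × List Int)) : Nat :=
  graph.length + (graph.map (fun p => p.2.length)).sum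

-- ===== PORT A =====
-- transliteration of scc_dfs: pvDfsA is the function body, pvGoA the 'for head in heads' loop
mutual
def pvDfsA (g : PySem.Dict Int (List Int)) : Nat → Int → PySem.Dict Int Int → Int → List Int → Option (PySem.Dict Int Int × Int × List Int)
  | 0, _, _, _, _ => none
  | f+1, start, visited, currLabel, minions =>
      (pvGoA g f (pvHeads g start) (visited.insert start 0) currLabel minions).bind
        (fun r => some (r.1.insert start r.2.1, r.2.1 + 1, r.2.2))
  termination_by f _ _ _ _ => (f, 0, 0)
def pvGoA (g : PySem.Dict Int (List Int)) : Nat → List Int → PySem.Dict Int Int → Int → List Int → Option (PySem.Dict Int Int × Int × List Int)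
  | _, [], visited, currLabel, minions => some (visited, currLabel, minions)
  | f, head :: rest, visited, currLabel, minions =>
      if !(visited.contains head) then
        (pvDfsA g f head visited currLabel (minions ++ [head])).bind
          (fun r => pvGoA g f rest r.1 r.2.1 r.2.2)
      else pvGoA g f rest visited currLabel minions
  termination_by f t _ _ _ => (f, 1, t.length)
end

-- the body of A's 'for i in range(qtyNodes, 0, -1)' loop
def pvStepA (g : PySem.Dict Int (List Int)) (F : Nat)
    (st : PySem.Dict Int Int × Int × PySem.Dict Int (List Int)) (i : Int) :
    PySem.Dict Int Int × Int × PySem.Dict Int (List Int) :=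
  if g.contains i && !(st.1.contains i) then
    match pvDfsA g (F+1) i st.1 st.2.1 [] with
    | none => st
    | some r => (r.1, r.2.1, st.2.2.insert i r.2.2)
  else st

def scc_loop (graph : List (Int × List Int)) (qtyNodes : Int) : (List (Int × Int)) × (List (Int × List Int)) :=
  let g := PySem.Dict.ofList graph
  let st := (PySem.List.pyRange qtyNodes 0 (-1)).foldl (pvStepA g (pvFuel graph))
              (PySem.Dict.empty, 1, PySem.Dict.empty)
  (st.1.items, st.2.2.items)

-- ===== PORT B =====
-- a list length is at most the sum of the lengths (used by pvRunB's termination measure)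
theorem pvLen_le_sum (l : List (List Int)) (x : List Int) (hx : x ∈ l) :
    x.length ≤ (l.map List.length).sum := by
  induction l with
  | nil => cases hx
  | cons a t ih =>
      rcases List.mem_cons.mp hx with h | h
      · subst h; simp
      · have := ih h; simp; omega

theorem pvHeads_len_le (g : PySem.Dict Int (List Int)) (u : Int) :
    (pvHeads g u).length ≤ (g.values.map List.length).sum := by
  unfold pvHeads
  cases hg : g.get? u with
  | none => simp
  | some ys =>
      have hmem : (u, ys) ∈ g.items := PySem.Dict.mem_items_of_get?_eq_some g hg
      have hv : ys ∈ g.values := by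
        simp only [PySem.Dict.values]
        exact List.mem_map.mpr ⟨(u, ys), hmem, rfl⟩
      simpa using pvLen_le_sum _ _ hv

-- transliteration of B's 'while stack:' loop; each frame is (node, remaining heads, fuel)
def pvRunB (g : PySem.Dict Int (List Int)) : List (Int × List Int × Nat) → PySem.Dict Int Int → Int → List Int → Option (PySem.Dict Int Int × Int × List Int)
  | [], visited, label, minions => some (visited, label, minions)
  | (node, [], _) :: stk, visited, label, minions =>
      pvRunB g stk (visited.insert node label) (label + 1) minions
  | (node, h :: rest, f) :: stk, visited, label, minions =>
      if !(visited.contains h) then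
        match f with
        | 0 => none
        | f'+1 =>
            pvRunB g ((h, pvHeads g h, f') :: (node, rest, f'+1) :: stk)
              (visited.insert h 0) label (minions ++ [h])
      else pvRunB g ((node, rest, f) :: stk) visited label minions
termination_by stk _ _ _ =>
  (stk.map (fun p => (p.2.1.length + 1) * ((g.values.map List.length).sum + 2) ^ p.2.2)).sum
decreasing_by
  · rename_i f2
    simp only [List.map_cons, List.sum_cons]
    have h1 : 0 < ((List.map List.length g.values).sum + 2) ^ f2 := by positivity
    nlinarith
  · simp only [List.map_cons, List.sum_cons, List.length_cons, pow_succ, Nat.succ_eq_add_one]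
    have hC : 0 < ((List.map List.length g.values).sum + 2) ^ f' := by positivity
    have hle := pvHeads_len_le g h
    nlinarith
  · simp only [List.map_cons, List.sum_cons, List.length_cons]
    have hC : 0 < ((List.map List.length g.values).sum + 2) ^ f := by positivity
    nlinarith

-- the body of B's outer loop (identical outer loop; the inner work is the stack run)
def pvStepB (g : PySem.Dict Int (List Int)) (F : Nat)
    (st : PySem.Dict Int Int × Int × PySem.Dict Int (List Int)) (i : Int) :
    PySem.Dict Int Int × Int × PySem.Dict Int (List Int) :=
  if g.contains i && !(st.1.contains i) then
    match pvRunB g [(i, pvHeads g i, F)] (st.1.insert i 0) st.2.1 [] with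
    | none => st
    | some r => (r.1, r.2.1, st.2.2.insert i r.2.2)
  else st

def scc_loop_alt (graph : List (Int × List Int)) (qtyNodes : Int) : (List (Int × Int)) × (List (Int × List Int)) :=
  let g := PySem.Dict.ofList graph
  let st := (PySem.List.pyRange qtyNodes 0 (-1)).foldl (pvStepB g (pvFuel graph))
              (PySem.Dict.empty, 1, PySem.Dict.empty)
  (st.1.items, st.2.2.items)

-- ===== PRECONDITION & SPEC =====
def Spec_scc_loop (graph : List (Int × List Int)) (qtyNodes : Int) (out : (List (Int × Int)) × (List (Int × List Int))) : Prop := out = scc_loop_alt graph qtyNodes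
instance (graph : List (Int × List Int)) (qtyNodes : Int) (out : (List (Int × Int)) × (List (Int × List Int))) : Decidable (Spec_scc_loop graph qtyNodes out) := by unfold Spec_scc_loop; infer_instance

-- ===== CLAIM (what is proved, stated in full; the proofs are below) =====
def Claim_equal_scc_loop : Prop := ∀ (graph : List (Int × List Int)) (qtyNodes : Int), Dom_scc_loop graph qtyNodes → Spec_scc_loop graph qtyNodes (scc_loop graph qtyNodes)

-- ===== LEMMAS AND PROOFS =====

-- the stack machine run with a top frame (s, t, f) is: finish pvGoA on t, then close frame s
theorem pvRunB_frame (g : PySem.Dict Int (List Int)) (f : Nat) :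
    ∀ (t : List Int) (s : Int) (stk : List (Int × List Int × Nat))
      (v : PySem.Dict Int Int) (l : Int) (m : List Int),
    pvRunB g ((s, t, f) :: stk) v l m =
      (pvGoA g f t v l m).bind
        (fun r => pvRunB g stk (r.1.insert s r.2.1) (r.2.1 + 1) r.2.2) := by
  induction f with
  | zero =>
      intro t
      induction t with
      | nil => intro s stk v l m; rw [pvRunB, pvGoA]; simp
      | cons h rest iht =>
          intro s stk v l m
          rw [pvRunB, pvGoA]
          by_cases hc : v.contains h
          · simp [hc, iht]
          · simp [hc]
            rw [pvDfsA]
            simp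
  | succ f' ihf =>
      intro t
      induction t with
      | nil => intro s stk v l m; rw [pvRunB, pvGoA]; simp
      | cons h rest iht =>
          intro s stk v l m
          rw [pvRunB, pvGoA]
          by_cases hc : v.contains h
          · simp [hc, iht]
          · simp [hc]
            rw [ihf, pvDfsA]
            cases hgo : pvGoA g f' (pvHeads g h) (v.insert h 0) l (m ++ [h]) with
            | none => simp
            | some r => simp [iht]

-- hence the two loop bodies agree
theorem pvStep_eq (g : PySem.Dict Int (List Int)) (F : Nat) : pvStepA g F = pvStepB g F := by
  funext st i
  unfold pvStepA pvStepB
  have h : pvDfsA g (F+1) i st.1 st.2.1 [] =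
      pvRunB g [(i, pvHeads g i, F)] (st.1.insert i 0) st.2.1 [] := by
    rw [pvRunB_frame, pvDfsA]
    cases hgo : pvGoA g F (pvHeads g i) (st.1.insert i 0) st.2.1 [] with
    | none => simp
    | some r => simp; rw [pvRunB]
  rw [h]

-- ===== VERDICT (by name: the statement is the Claim_ definition above) =====
theorem scc_loop_spec : Claim_equal_scc_loop := by
  intro graph qtyNodes _hdom
  unfold Spec_scc_loop
  simp only [scc_loop, scc_loop_alt, pvStep_eq]
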